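-- pv_equiv track=rewrite | github.com/banma1234/KSU_study | 1st_week/P_sugar.py | deliver
-- ===== SOURCE A (Python) =====
-- def deliver(num):
--     count = 0
--     while(True):
--         if num%5 == 0:
--             return count + num//5
--         num-=3
--         count+=1
--         if num<0:
--             return -1
-- ===== SOURCE B (Python) =====
-- def deliver(num):
--     for b in range(num // 5, -1, -1):
--         r = num - 5 * b
--         if r % 3 == 0:
--             return b + r // 3
--     return -1
-- ===== Notes on version B (the rewrite author's own statement) =====
-- stated objective: alternative
-- what changed: B iterates the count of 5kg bags downward from num//5 and returns on the first remainder divisible by 3, instead of A's unbounded while-loop that repeatedly subtracts 3 and tests divisibility by 5.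
-- intended difference: For num <= -10 with num divisible by 5, A returns the negative value num//5 (e.g. -2 for -10) because its divisibility test fires before the negativity check, while B returns -1, the intended 'impossible' answer for a weight that cannot be delivered. — e.g. on deliver(-10): A returns -2, B returns -1
import Mathlib
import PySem

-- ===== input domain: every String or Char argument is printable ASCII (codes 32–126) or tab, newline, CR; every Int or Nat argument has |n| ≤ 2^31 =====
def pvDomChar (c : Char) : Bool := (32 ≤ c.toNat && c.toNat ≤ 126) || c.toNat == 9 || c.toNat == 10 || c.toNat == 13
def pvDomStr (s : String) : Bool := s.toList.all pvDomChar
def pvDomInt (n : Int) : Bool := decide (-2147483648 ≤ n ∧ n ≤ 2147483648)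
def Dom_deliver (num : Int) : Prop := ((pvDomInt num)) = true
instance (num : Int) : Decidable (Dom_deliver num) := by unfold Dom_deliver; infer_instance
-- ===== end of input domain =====

-- B counts 5kg bags downward from num//5 (first remainder divisible by 3 wins) instead of
-- A's while-loop subtracting 3; B returns -1 on undeliverable negative weights where A
-- leaks num//5 (see D_deliver).


-- ===== PORT A =====
-- while(True): if num%5==0 return count+num//5; num-=3; count+=1; if num<0 return -1
def deliverGo (num count : Int) : Int :=
  if PySem.Int.mod num 5 = 0 then count + PySem.Int.floordiv num 5
  else if num - 3 < 0 then -1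
  else deliverGo (num - 3) (count + 1)
termination_by num.toNat
decreasing_by
  rename_i _ h2
  simp only [not_lt] at h2
  omega

def deliver (num : Int) : Int := deliverGo num 0

-- ===== PORT B =====
-- for b in range(num//5, -1, -1): r = num-5*b; if r%3==0: return b + r//3   /  return -1
def altLoop (num : Int) : List Int → Int
  | [] => -1
  | b :: rest =>
      if PySem.Int.mod (num - 5 * b) 3 = 0 then b + PySem.Int.floordiv (num - 5 * b) 3
      else altLoop num rest

def deliver_alt (num : Int) : Int :=
  altLoop num (PySem.List.pyRange (PySem.Int.floordiv num 5) (-1) (-1))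

-- ===== PRECONDITION & SPEC =====
-- For num ≤ -10 divisible by 5, A returns the negative value num//5 (its num%5==0 test fires
-- before the negativity check), while B returns -1, the intended answer for an undeliverable
-- weight.
def D_deliver (num : Int) : Prop := num ≤ -10 ∧ num % 5 = 0
instance (num : Int) : Decidable (D_deliver num) := by unfold D_deliver; infer_instance

def Spec_deliver (num : Int) (out : Int) : Prop := ¬ D_deliver num → out = deliver_alt num
instance (num : Int) (out : Int) : Decidable (Spec_deliver num out) := by unfold Spec_deliver; infer_instance

def pvDiffWitness_deliver : Int := (-10)
def pvDiffWitnessOut_deliver : Int × Int := (-2, -1)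

-- ===== CLAIM (what is proved, stated in full; the proofs are below) =====
def Claim_unchanged_deliver : Prop := ∀ (num : Int), Dom_deliver num → Spec_deliver num (deliver num)
def Claim_changed_deliver : Prop := Dom_deliver (pvDiffWitness_deliver) ∧ D_deliver (pvDiffWitness_deliver) ∧ deliver (pvDiffWitness_deliver) = pvDiffWitnessOut_deliver.1 ∧ deliver_alt (pvDiffWitness_deliver) = pvDiffWitnessOut_deliver.2 ∧ pvDiffWitnessOut_deliver.1 ≠ pvDiffWitnessOut_deliver.2
def Claim_exact_deliver : Prop := ∀ (num : Int), Dom_deliver num → D_deliver num → deliver num ≠ deliver_alt num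


-- ===== LEMMAS AND PROOFS =====

-- Python's % and // on a positive divisor agree with Lean's emod/ediv.
theorem fmod_eq_emod_of_nonneg (a b : Int) (h : 0 ≤ b) : a.fmod b = a % b := by
  rw [Int.fmod_def, Int.emod_def, Int.fdiv_eq_ediv_of_nonneg a h]

-- range(t, -1, -1) as a mapped List.range.
theorem pyRange_down_eq (t : Int) :
    PySem.List.pyRange t (-1) (-1) =
      (List.range (t + 1).toNat).map (fun k : Nat => t + (-1) * (k : Int)) := by
  simp only [PySem.List.pyRange]
  norm_num
  split
  · norm_num
  · have h0 : (t + 1).toNat = 0 := by omega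
    simp [h0]

-- range(t, -1, -1) peels its head when 0 ≤ t.
theorem pyRange_down_cons (t : Int) (h : 0 ≤ t) :
    PySem.List.pyRange t (-1) (-1) = t :: PySem.List.pyRange (t - 1) (-1) (-1) := by
  rw [pyRange_down_eq, pyRange_down_eq]
  have h1 : (t + 1).toNat = (t - 1 + 1).toNat + 1 := by omega
  rw [h1, List.range_succ_eq_map, List.map_cons, List.map_map]
  norm_num
  intro a _
  ring

-- range(t, -1, -1) is empty for t < 0.
theorem pyRange_down_nil (t : Int) (h : t < 0) :
    PySem.List.pyRange t (-1) (-1) = [] := by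
  rw [pyRange_down_eq]
  have h0 : (t + 1).toNat = 0 := by omega
  simp [h0]

-- Closed form for A's loop on nonnegative num: k = (2*num) % 5 is the number of 3kg bags.
theorem deliverGo_closed (num count : Int) (h : 0 <= num) :
    deliverGo num count =
      (if 3 * ((2 * num) % 5) <= num
       then count + (2 * num) % 5 + (num - 3 * ((2 * num) % 5)) / 5
       else -1) := by
  revert h
  fun_induction deliverGo num count with
  | case1 num count h5 =>
      intro h
      simp only [PySem.Int.mod, PySem.Int.floordiv] at h5 ⊢
      rw [fmod_eq_emod_of_nonneg _ 5 (by norm_num)] at h5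
      rw [Int.fdiv_eq_ediv_of_nonneg num (by norm_num : (0:Int) <= 5)]
      split <;> omega
  | case2 num count h5 hneg =>
      intro h
      simp only [PySem.Int.mod] at h5
      rw [fmod_eq_emod_of_nonneg _ 5 (by norm_num)] at h5
      have h12 : num = 1 ∨ num = 2 := by omega
      rcases h12 with rfl | rfl <;> rw [if_neg (by decide)]
  | case3 num count h5 hneg ih =>
      intro h
      simp only [PySem.Int.mod] at h5
      rw [fmod_eq_emod_of_nonneg _ 5 (by norm_num)] at h5
      rw [ih (by omega)]
      obtain ⟨q, r, hr0, hr1, rfl⟩ : ∃ q r : Int, 0 <= r ∧ r < 15 ∧ num = 15 * q + r :=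
        ⟨num / 15, num % 15, by omega, by omega, by omega⟩
      interval_cases r <;> split <;> split <;> omega

-- Closed form for B's descending loop starting at t.
theorem altLoop_closed (t num : Int) :
    altLoop num (PySem.List.pyRange t (-1) (-1)) =
      (if 0 <= t - (t - 2 * num) % 3
       then (t - (t - 2 * num) % 3) + (num - 5 * (t - (t - 2 * num) % 3)) / 3
       else -1) := by
  rcases lt_or_ge t 0 with hneg | hpos
  · rw [pyRange_down_nil t hneg, altLoop]
    split <;> omega
  · obtain ⟨n, rfl⟩ : ∃ n : Nat, t = (n : Int) := ⟨t.toNat, by omega⟩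
    clear hpos
    induction n with
    | zero =>
        rw [show ((0:Nat):Int) = 0 by norm_num,
          pyRange_down_cons 0 le_rfl, pyRange_down_nil (0 - 1) (by norm_num)]
        simp only [altLoop, PySem.Int.mod, PySem.Int.floordiv]
        rw [fmod_eq_emod_of_nonneg _ 3 (by norm_num),
          Int.fdiv_eq_ediv_of_nonneg _ (by norm_num : (0:Int) <= 3)]
        split <;> split <;> omega
    | succ m ih =>
        rw [show ((m+1:Nat):Int) = (m:Int) + 1 by push_cast; ring,
          pyRange_down_cons ((m:Int) + 1) (by positivity),
          show ((m:Int) + 1) - 1 = (m:Int) by ring, altLoop]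
        simp only [PySem.Int.mod, PySem.Int.floordiv]
        rw [fmod_eq_emod_of_nonneg _ 3 (by norm_num),
          Int.fdiv_eq_ediv_of_nonneg _ (by norm_num : (0:Int) <= 3)]
        split
        · have hj : ((m:Int) + 1 - 2 * num) % 3 = 0 := by clear ih; omega
          rw [hj, sub_zero, if_pos (by positivity)]
        · rw [ih]
          have hj2 : ((m:Int) - 2 * num) % 3 = ((m:Int) + 1 - 2 * num) % 3 - 1 := by
            rename_i h0
            clear ih
            obtain ⟨a, r, hr0, hr1, rfl⟩ : ∃ a r : Int, 0 <= r ∧ r < 3 ∧ num = 3 * a + r :=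
              ⟨num / 3, num % 3, by omega, by omega, by omega⟩
            obtain ⟨b, t, ht0, ht1, hm⟩ : ∃ b t : Int, 0 <= t ∧ t < 3 ∧ (m:Int) = 3 * b + t :=
              ⟨(m:Int) / 3, (m:Int) % 3, by omega, by omega, by omega⟩
            rw [hm] at h0 ⊢
            interval_cases r <;> interval_cases t <;> omega
          have harg : ∀ x : Int, (m:Int) - (x - 1) = (m:Int) + 1 - x := fun x => by ring
          rw [hj2, harg]

theorem deliver_alt_closed (num : Int) :
    deliver_alt num =
      (if 0 <= num / 5 - (num / 5 - 2 * num) % 3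
       then (num / 5 - (num / 5 - 2 * num) % 3) + (num - 5 * (num / 5 - (num / 5 - 2 * num) % 3)) / 3
       else -1) := by
  rw [deliver_alt, show PySem.Int.floordiv num 5 = num / 5 from
    Int.fdiv_eq_ediv_of_nonneg num (by norm_num), altLoop_closed]

-- ===== VERDICT (by name: the statement is the Claim_ definition above) =====
theorem deliver_spec : Claim_unchanged_deliver := by
  intro num _
  unfold Spec_deliver
  intro hnd
  unfold D_deliver at hnd
  rw [deliver_alt_closed]
  rcases lt_or_ge num 0 with hneg | hpos
  · rw [deliver, deliverGo]
    simp only [PySem.Int.mod, PySem.Int.floordiv]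
    rw [fmod_eq_emod_of_nonneg _ 5 (by norm_num),
      Int.fdiv_eq_ediv_of_nonneg num (by norm_num : (0:Int) <= 5)]
    obtain ⟨q, r, hr0, hr1, rfl⟩ : ∃ q r : Int, 0 <= r ∧ r < 15 ∧ num = 15 * q + r :=
      ⟨num / 15, num % 15, by omega, by omega, by omega⟩
    interval_cases r <;> split <;> split <;> omega
  · rw [deliver, deliverGo_closed num 0 hpos]
    obtain ⟨q, r, hr0, hr1, rfl⟩ : ∃ q r : Int, 0 <= r ∧ r < 15 ∧ num = 15 * q + r :=
      ⟨num / 15, num % 15, by omega, by omega, by omega⟩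
    interval_cases r <;> split <;> split <;> omega

theorem deliver_changed : Claim_changed_deliver := by
  unfold Claim_changed_deliver
  refine ⟨by decide, by decide, ?_, by decide, by decide⟩
  rw [deliver, deliverGo]
  decide

theorem deliver_tight : Claim_exact_deliver := by
  intro num _ hD
  unfold D_deliver at hD
  rw [deliver, deliverGo, deliver_alt_closed]
  simp only [PySem.Int.mod, PySem.Int.floordiv]
  rw [fmod_eq_emod_of_nonneg _ 5 (by norm_num),
    Int.fdiv_eq_ediv_of_nonneg num (by norm_num : (0:Int) <= 5)]
  rw [if_pos (by omega)]
  obtain ⟨q, r, hr0, hr1, rfl⟩ : ∃ q r : Int, 0 <= r ∧ r < 15 ∧ num = 15 * q + r :=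
    ⟨num / 15, num % 15, by omega, by omega, by omega⟩
  interval_cases r <;> split <;> omega
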